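-- pv_equiv track=rewrite | github.com/Dggz/supagrep | supergrep/vnx/utils.py | check_empty_arrays
-- ===== SOURCE A (Python) =====
-- from collections import defaultdict
-- from itertools import chain
--
-- def array_occurrences(cmd_out: list) -> defaultdict:
--     """Creates a dictionary that counts how many times each array appears
--
--     :param cmd_out:
--     :return:
--     """
--     array_frequency = defaultdict(int)  # type: defaultdict
--     array_name = 0
--     for entry in cmd_out:
--         array_frequency[entry[array_name]] += 1
--     return array_frequency
--
-- def check_empty_arrays(cmd_out: list) -> list:
--     """Checks if the array did not have input, writes a comment in the last column
--
--     Also removes extra blank rows which appear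
--     because of the Filldown attribute in the FSM
--
--     :param cmd_out:
--     :return:
--     """
--     array_counts = array_occurrences(cmd_out)
--     new_cmd_out = []
--     comments = -1
--     for entry in cmd_out:
--         flat_entry = chain(*entry)
--         if ''.join(flat_entry) == entry[0]:
--             if array_counts[entry[0]] == 1:
--                 entry[comments] = 'No data for this array'
--                 new_cmd_out.append(entry)
--             else:
--                 array_counts[entry[0]] -= 1
--         else:
--             new_cmd_out.append(entry)
--     return new_cmd_out
-- ===== SOURCE B (Python) =====
-- def check_empty_arrays(cmd_out: list) -> list:
--     """Same result as A: two passes — collect the names that have some non-blank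
--     row, then walk the rows backwards keeping a blank row only when its name has
--     no non-blank row and was not seen later (i.e. it is the last row of an
--     all-blank name), marking its last column; finally reverse back."""
--     non_empty_names = set()
--     for entry in cmd_out:
--         if ''.join(entry[1:]):
--             non_empty_names.add(entry[0])
--     out = []
--     seen = set()
--     for entry in reversed(cmd_out):
--         name = entry[0]
--         if ''.join(entry[1:]):
--             out.append(entry)
--         elif name not in non_empty_names and name not in seen:
--             entry[-1] = 'No data for this array'
--             out.append(entry)
--         seen.add(name)
--     out.reverse()
--     return out
-- ===== Notes on version B (the rewrite author's own statement) =====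
-- stated objective: alternative
-- what changed: Replaces A's mutable countdown dict (decrementing per-name counts to decide which blank row survives) by two set-based passes: one forward pass collecting the names that have any non-blank row, then a backward pass with a 'seen' set that keeps a blank row exactly when its name has no non-blank row and does not occur later, building the output back-to-front.
import Mathlib
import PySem

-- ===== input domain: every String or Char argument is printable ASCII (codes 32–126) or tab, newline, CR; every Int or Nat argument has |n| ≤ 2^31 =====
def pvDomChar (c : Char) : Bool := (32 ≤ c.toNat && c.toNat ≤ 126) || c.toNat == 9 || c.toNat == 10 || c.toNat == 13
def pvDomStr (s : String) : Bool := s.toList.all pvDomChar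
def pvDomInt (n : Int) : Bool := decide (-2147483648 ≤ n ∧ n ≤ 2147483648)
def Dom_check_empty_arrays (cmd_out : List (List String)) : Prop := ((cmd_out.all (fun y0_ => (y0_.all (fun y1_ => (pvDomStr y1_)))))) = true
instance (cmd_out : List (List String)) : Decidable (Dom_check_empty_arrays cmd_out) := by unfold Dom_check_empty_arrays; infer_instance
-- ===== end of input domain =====

-- B replaces A's decrementing per-name count dict by two set-based passes (the names
-- with a non-blank row, then a backward walk with a 'seen' set, output built
-- back-to-front). Both Pythons mutate the kept blank rows in place (the same rows,
-- set to the same values); the equivalence proved here is about the returned value.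

-- ===== PORT A =====
-- entry[0]; exact whenever entry is non-empty (guaranteed by Pre_)
def pvName (e : List String) : String := (PySem.List.pyGet? e 0).getD ""

-- array_occurrences: defaultdict(int) counting loop (array_frequency[entry[0]] += 1);
-- only its lookups are observed, so the getD/modify dict is exact
def array_occurrences (cmd_out : List (List String)) : PySem.Dict String Int :=
  cmd_out.foldl (fun d entry => d.modify (pvName entry) 0 (· + 1)) PySem.Dict.empty

-- one iteration of A's for-loop; state = (array_counts, new_cmd_out).
-- ''.join(chain(*entry)) concatenates the characters of all the string fields,
-- which is exactly PySem.Str.join "" entry; entry[comments] = ... with comments = -1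
-- is the total form pySetD (exact: entry is non-empty under Pre_)
def aStep (st : PySem.Dict String Int × List (List String)) (entry : List String) :
    PySem.Dict String Int × List (List String) :=
  let name := pvName entry
  if PySem.Str.join "" entry == name then
    if st.1.getD name 0 == 1 then
      (st.1, st.2 ++ [PySem.List.pySetD entry (-1) "No data for this array"])
    else
      (st.1.insert name (st.1.getD name 0 - 1), st.2)
  else
    (st.1, st.2 ++ [entry])

def check_empty_arrays (cmd_out : List (List String)) : List (List String) :=
  (cmd_out.foldl aStep (array_occurrences cmd_out, ([] : List (List String)))).2

-- ===== PORT B =====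
-- ''.join(entry[1:])
def pvTailJoin (e : List String) : String :=
  PySem.Str.join "" (PySem.List.slice e (some 1) none)

-- one iteration of B's backward loop; state = (out, seen); ne = non_empty_names
def bStep (ne : PySem.Set String) (st : List (List String) × PySem.Set String)
    (entry : List String) : List (List String) × PySem.Set String :=
  let name := pvName entry
  if pvTailJoin entry != "" then
    (st.1 ++ [entry], PySem.Set.add st.2 name)
  else if !(PySem.Set.contains ne name) && !(PySem.Set.contains st.2 name) then
    (st.1 ++ [PySem.List.pySetD entry (-1) "No data for this array"], PySem.Set.add st.2 name)
  else
    (st.1, PySem.Set.add st.2 name)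

def check_empty_arrays_alt (cmd_out : List (List String)) : List (List String) :=
  let ne : PySem.Set String :=
    cmd_out.foldl
      (fun s entry => if pvTailJoin entry != "" then PySem.Set.add s (pvName entry) else s)
      PySem.Set.empty
  ((cmd_out.reverse.foldl (bStep ne) (([] : List (List String)), PySem.Set.empty)).1).reverse

-- ===== PRECONDITION & SPEC =====
-- Pre_ excludes inputs containing a zero-length row, on which both Pythons raise IndexError (entry[0]).
def Pre_check_empty_arrays (cmd_out : List (List String)) : Prop :=
  ∀ e ∈ cmd_out, e ≠ []
instance (cmd_out : List (List String)) : Decidable (Pre_check_empty_arrays cmd_out) := by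
  unfold Pre_check_empty_arrays; infer_instance

def pvWitness_check_empty_arrays : List (List String) :=
  [["sys", "5", "ok"], ["arr1", "", ""], ["arr1", "", ""], ["sys", "7", "ok"]]

def Spec_check_empty_arrays (cmd_out : List (List String)) (out : List (List String)) : Prop := out = check_empty_arrays_alt cmd_out
instance (cmd_out : List (List String)) (out : List (List String)) : Decidable (Spec_check_empty_arrays cmd_out out) := by unfold Spec_check_empty_arrays; infer_instance

-- ===== CLAIM (what is proved, stated in full; the proofs are below) =====
def Claim_equal_check_empty_arrays : Prop := ∀ (cmd_out : List (List String)), Dom_check_empty_arrays cmd_out → Pre_check_empty_arrays cmd_out → Spec_check_empty_arrays cmd_out (check_empty_arrays cmd_out)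

-- ===== LEMMAS AND PROOFS =====
-- blank row: every field after the first is empty
def pvBlk (e : List String) : Bool := pvTailJoin e == ""

lemma join_nil_cons (p : List Char) (rest : List (List Char)) :
    PySem.Chars.join [] (p :: rest) = p ++ PySem.Chars.join [] rest := by
  cases rest with
  | nil => simp [PySem.Chars.join_singleton, PySem.Chars.join_nil]
  | cons q r => simp [PySem.Chars.join_cons_cons]

-- A's test ''.join(chain(*entry)) == entry[0] says exactly "the tail is all-empty"
lemma pv_blkA (e : List String) (he : e ≠ []) :
    (PySem.Str.join "" e == pvName e) = pvBlk e := by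
  cases e with
  | nil => exact absurd rfl he
  | cons x t =>
    have hx : pvName (x :: t) = x := by simp [pvName]
    have htl : PySem.List.slice (x :: t) (some 1) none = t := PySem.List.slice_from_one _
    simp only [pvBlk, pvTailJoin, hx, htl]
    rw [Bool.eq_iff_iff]
    simp only [beq_iff_eq]
    rw [String.ext_iff, String.ext_iff]
    rw [PySem.Str.toList_join, PySem.Str.toList_join]
    simp only [List.map_cons, String.toList_empty, join_nil_cons]
    constructor
    · intro h; exact List.append_right_eq_self.mp h
    · intro h; simp [h]

-- occurrences / non-blank occurrences of a name
def pvOcc (n : String) (l : List (List String)) : Nat :=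
  l.countP (fun e => pvName e == n)

def pvNB (n : String) (l : List (List String)) : Nat :=
  l.countP (fun e => pvName e == n && !pvBlk e)

def pvMark (e : List String) : List String :=
  PySem.List.pySetD e (-1) "No data for this array"

-- the common characterisation: keep a non-blank row; keep a blank row iff its name
-- has no non-blank row anywhere in L and no occurrence among the later rows
def pvFront (L : List (List String)) (e : List String) (rest : List (List String)) :
    List (List String) :=
  if pvBlk e then
    (if pvNB (pvName e) L = 0 ∧ pvOcc (pvName e) rest = 0 then [pvMark e] else [])
  else [e]

def pvSpec (L : List (List String)) : List (List String) → List (List String) → List (List String)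
  | [], _ => []
  | e :: t, aft => pvFront L e (t ++ aft) ++ pvSpec L t aft

lemma pvOcc_cons (n : String) (e : List String) (t : List (List String)) :
    pvOcc n (e :: t) = (if pvName e = n then 1 else 0) + pvOcc n t := by
  unfold pvOcc; rw [List.countP_cons]; by_cases h : pvName e = n <;> simp [h] <;> omega

lemma pvNB_cons (n : String) (e : List String) (t : List (List String)) :
    pvNB n (e :: t) = (if pvName e = n ∧ pvBlk e = false then 1 else 0) + pvNB n t := by
  unfold pvNB; rw [List.countP_cons]
  by_cases h : pvName e = n <;> by_cases hb : pvBlk e <;> simp [h, hb] <;> omega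

lemma pvNB_append (n : String) (a b : List (List String)) :
    pvNB n (a ++ b) = pvNB n a + pvNB n b := by
  unfold pvNB; rw [List.countP_append]

lemma pvNB_nil (n : String) : pvNB n [] = 0 := rfl

lemma pvNB_le_pvOcc (n : String) (l : List (List String)) : pvNB n l ≤ pvOcc n l := by
  unfold pvNB pvOcc
  apply List.countP_mono_left
  intro e _ h
  simp at h ⊢; exact h.1

lemma pv_ao_getD (L : List (List String)) (n : String) :
    (array_occurrences L).getD n 0 = (pvOcc n L : Int) := by
  unfold array_occurrences pvOcc
  rw [← List.foldl_map (f := pvName) (g := fun d x => PySem.Dict.modify d x 0 (· + 1))]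
  rw [PySem.Dict.getD_foldl_modify_add_one]
  simp [List.count_eq_countP, List.countP_map]
  rfl

lemma pv_ne_mem (l : List (List String)) (s : PySem.Set String) (x : String) :
    (x ∈ l.foldl
      (fun s entry => if pvTailJoin entry != "" then PySem.Set.add s (pvName entry) else s) s)
    ↔ x ∈ s ∨ pvNB x l ≠ 0 := by
  induction l generalizing s with
  | nil => simp [pvNB]
  | cons e t ih =>
    rw [List.foldl_cons, ih]
    have hc : pvNB x (e :: t)
        = (if (pvName e == x && !pvBlk e) = true then 1 else 0) + pvNB x t := by
      unfold pvNB; rw [List.countP_cons]; omega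
    by_cases hb : pvBlk e = true
    · have hstep : (if pvTailJoin e != "" then PySem.Set.add s (pvName e) else s) = s := by
        simp only [pvBlk, beq_iff_eq] at hb; simp [hb]
      rw [hstep, hc, hb]
      simp
    · have hstep : (if pvTailJoin e != "" then PySem.Set.add s (pvName e) else s)
          = PySem.Set.add s (pvName e) := by
        simp only [pvBlk, beq_iff_eq] at hb; simp [hb]
      rw [hstep, hc, PySem.Set.mem_add]
      by_cases hx : pvName e = x
      · simp [hx, hb]
      · have : (pvName e == x) = false := by simp [hx]
        rw [this]
        have hz : (if (false && !pvBlk e) = true then 1 else 0) + pvNB x t = pvNB x t := by simp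
        rw [hz]
        constructor
        · rintro ((h | h) | h)
          · exact Or.inl h
          · exact absurd h.symm hx
          · exact Or.inr h
        · rintro (h | h)
          · exact Or.inl (Or.inl h)
          · exact Or.inr h

-- A's fold keeps exactly pvSpec: invariant: for every name either it no longer occurs,
-- or its count equals (occurrences left) + (non-blank occurrences already passed)
lemma pv_foldA (l p : List (List String)) (c : PySem.Dict String Int)
    (acc : List (List String)) (hne : ∀ e ∈ l, e ≠ [])
    (hc : ∀ n, pvOcc n l = 0 ∨ c.getD n 0 = (pvOcc n l : Int) + (pvNB n p : Nat)) :
    (l.foldl aStep (c, acc)).2 = acc ++ pvSpec (p ++ l) l [] := by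
  induction l generalizing p c acc with
  | nil => simp [pvSpec]
  | cons e t ih =>
    have he : e ≠ [] := hne e (by simp)
    have hocc : pvOcc (pvName e) (e :: t) = 1 + pvOcc (pvName e) t := by
      rw [pvOcc_cons]; simp
    have hcr : c.getD (pvName e) 0 = ((pvOcc (pvName e) (e :: t) : Int)) + (pvNB (pvName e) p : Nat) := by
      rcases hc (pvName e) with h | h
      · rw [hocc] at h; omega
      · exact h
    rw [List.foldl_cons]
    show (t.foldl aStep (aStep (c, acc) e)).2 = _
    simp only [aStep, pv_blkA e he]
    by_cases hb : pvBlk e = true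
    · rw [hb]
      simp only [if_true]
      by_cases hg : c.getD (pvName e) 0 = 1
      · have h1 : (c.getD (pvName e) 0 == 1) = true := by simp [hg]
        rw [h1]
        simp only [if_true]
        have hkey : pvOcc (pvName e) t = 0 ∧ pvNB (pvName e) p = 0 := by
          rw [hg, hocc] at hcr; constructor <;> omega
        have hm : PySem.List.pySetD e (-1) "No data for this array" = pvMark e := rfl
        rw [hm, ih (p ++ [e]) c (acc ++ [pvMark e]) (fun x hx => hne x (by simp [hx]))]
        · have hL : (p ++ [e]) ++ t = p ++ e :: t := by simp
          rw [hL]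
          have hfront : pvFront (p ++ e :: t) e (t ++ []) = [pvMark e] := by
            unfold pvFront
            rw [hb]
            have hnbL : pvNB (pvName e) (p ++ e :: t) = 0 := by
              rw [pvNB_append, pvNB_cons]
              have := pvNB_le_pvOcc (pvName e) t
              simp [hb, hkey.2]; omega
            simp [hnbL, hkey.1]
          show acc ++ [pvMark e] ++ pvSpec (p ++ e :: t) t [] = acc ++ pvSpec (p ++ e :: t) (e :: t) []
          rw [pvSpec, hfront]
          simp
        · intro n
          by_cases hn : n = pvName e
          · left; rw [hn]; exact hkey.1
          · rcases hc n with h | h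
            · left; rw [pvOcc_cons] at h; omega
            · right
              rw [pvOcc_cons, if_neg (fun hh => hn hh.symm)] at h
              rw [pvNB_append, pvNB_cons]
              rw [if_neg (fun hh => hn hh.1.symm)]
              simp [pvNB] at *
              push_cast at *
              omega
      · have h1 : (c.getD (pvName e) 0 == 1) = false := by simp [hg]
        rw [h1]
        simp only [Bool.false_eq_true, if_false]
        rw [ih (p ++ [e]) _ acc (fun x hx => hne x (by simp [hx]))]
        · have hL : (p ++ [e]) ++ t = p ++ e :: t := by simp
          rw [hL]
          have hfront : pvFront (p ++ e :: t) e (t ++ []) = [] := by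
            unfold pvFront
            rw [hb]
            simp only [if_true]
            rw [if_neg]
            rintro ⟨hnbL, hocct⟩
            simp only [List.append_nil] at hocct
            have hnbp : pvNB (pvName e) p = 0 := by
              rw [pvNB_append] at hnbL; omega
            rw [hocc, hocct] at hcr
            rw [hnbp] at hcr
            simp at hcr
            exact hg (by omega)
          rw [pvSpec, hfront]
          simp
        · intro n
          by_cases hn : n = pvName e
          · subst hn
            right
            rw [PySem.Dict.getD_insert_self]
            rw [hocc] at hcr
            rw [pvNB_append, pvNB_cons, if_neg (by simp [hb]), pvNB_nil]
            push_cast at *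
            omega
          · rcases hc n with h | h
            · left; rw [pvOcc_cons] at h; omega
            · right
              rw [PySem.Dict.getD_insert_of_ne _ _ _ hn]
              rw [pvOcc_cons, if_neg (fun hh => hn hh.symm)] at h
              rw [pvNB_append, pvNB_cons, if_neg (fun hh => hn hh.1.symm), pvNB_nil]
              push_cast at *
              omega
    · have hb' : pvBlk e = false := by simp at hb; exact hb
      rw [hb']
      simp only [Bool.false_eq_true, if_false]
      rw [ih (p ++ [e]) c (acc ++ [e]) (fun x hx => hne x (by simp [hx]))]
      · have hL : (p ++ [e]) ++ t = p ++ e :: t := by simp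
        rw [hL]
        have hfront : pvFront (p ++ e :: t) e (t ++ []) = [e] := by
          unfold pvFront; rw [hb']; simp
        rw [pvSpec, hfront]
        simp
      · intro n
        by_cases hn : n = pvName e
        · subst hn
          right
          rw [hocc] at hcr
          rw [pvNB_append, pvNB_cons, if_pos ⟨rfl, hb'⟩, pvNB_nil]
          push_cast at *
          omega
        · rcases hc n with h | h
          · left; rw [pvOcc_cons] at h; omega
          · right
            rw [pvOcc_cons, if_neg (fun hh => hn hh.symm)] at h
            rw [pvNB_append, pvNB_cons, if_neg (fun hh => hn hh.1.symm), pvNB_nil]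
            push_cast at *
            omega

-- B's backward fold keeps exactly pvSpec, with 'seen' = names occurring later
lemma pv_foldB (ne : PySem.Set String) (L : List (List String))
    (hne : ∀ x, x ∈ ne ↔ pvNB x L ≠ 0)
    (l aft : List (List String)) (out : List (List String)) (s : PySem.Set String)
    (hs : ∀ x, x ∈ s ↔ pvOcc x aft ≠ 0) :
    (l.reverse.foldl (bStep ne) (out, s)).1 = out ++ (pvSpec L l aft).reverse ∧
    (∀ x, x ∈ (l.reverse.foldl (bStep ne) (out, s)).2 ↔ pvOcc x (l ++ aft) ≠ 0) := by
  induction l generalizing aft out s with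
  | nil => simpa [pvSpec] using hs
  | cons e t ih =>
    rw [List.reverse_cons, List.foldl_append]
    obtain ⟨ih1, ih2⟩ := ih aft out s hs
    set st := t.reverse.foldl (bStep ne) (out, s) with hst
    rw [List.foldl_cons, List.foldl_nil]
    have hspec : pvSpec L (e :: t) aft = pvFront L e (t ++ aft) ++ pvSpec L t aft := rfl
    have hmemadd : ∀ x, x ∈ PySem.Set.add st.2 (pvName e) ↔ pvOcc x ((e :: t) ++ aft) ≠ 0 := by
      intro x
      rw [PySem.Set.mem_add, ih2, List.cons_append, pvOcc_cons]
      by_cases hx : pvName e = x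
      · simp [hx]
      · have hx' : ¬ x = pvName e := fun h => hx h.symm
        simp [hx, hx']
    by_cases hb : pvBlk e = true
    · have hcond : (pvTailJoin e != "") = false := by
        simp only [pvBlk, beq_iff_eq] at hb; simp [hb]
      simp only [bStep, hcond, Bool.false_eq_true, if_false]
      by_cases hk : pvNB (pvName e) L = 0 ∧ pvOcc (pvName e) (t ++ aft) = 0
      · have hc2 : (!(PySem.Set.contains ne (pvName e)) && !(PySem.Set.contains st.2 (pvName e))) = true := by
          have h1 : PySem.Set.contains ne (pvName e) = false := by
            rw [← Bool.not_eq_true, PySem.Set.contains_iff, hne]; simp [hk.1]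
          have h2 : PySem.Set.contains st.2 (pvName e) = false := by
            rw [← Bool.not_eq_true, PySem.Set.contains_iff, ih2]; simp [hk.2]
          rw [h1, h2]; rfl
        rw [hc2]
        simp only [if_true]
        refine ⟨?_, hmemadd⟩
        have hfront : pvFront L e (t ++ aft) = [pvMark e] := by
          unfold pvFront; rw [hb]; simp [hk.1, hk.2]
        rw [ih1, hspec, hfront]
        simp [pvMark]
      · have hc2 : (!(PySem.Set.contains ne (pvName e)) && !(PySem.Set.contains st.2 (pvName e))) = false := by
          rcases (not_and_or.mp hk) with h | h
          · have h1 : PySem.Set.contains ne (pvName e) = true := by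
              rw [PySem.Set.contains_iff, hne]; exact h
            rw [h1]; rfl
          · have h2 : PySem.Set.contains st.2 (pvName e) = true := by
              rw [PySem.Set.contains_iff, ih2]; exact h
            rw [h2, Bool.not_true, Bool.and_false]
        rw [hc2]
        simp only [Bool.false_eq_true, if_false]
        refine ⟨?_, hmemadd⟩
        have hfront : pvFront L e (t ++ aft) = [] := by
          unfold pvFront; rw [hb]; simp only [if_true]; rw [if_neg hk]
        rw [ih1, hspec, hfront]
        simp
    · have hcond : (pvTailJoin e != "") = true := by
        simp only [pvBlk] at hb; simp at hb ⊢; exact hb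
      simp only [bStep, hcond, if_true]
      refine ⟨?_, hmemadd⟩
      have hb' : pvBlk e = false := by simp at hb; exact hb
      have hfront : pvFront L e (t ++ aft) = [e] := by
        unfold pvFront; rw [hb']; simp
      rw [ih1, hspec, hfront]
      simp

-- ===== VERDICT (by name: the statement is the Claim_ definition above) =====
theorem check_empty_arrays_spec : Claim_equal_check_empty_arrays := by
  intro L _hdom hpre
  unfold Spec_check_empty_arrays
  have hA : check_empty_arrays L = pvSpec L L [] := by
    unfold check_empty_arrays
    have hc : ∀ n, pvOcc n L = 0 ∨ (array_occurrences L).getD n 0 = (pvOcc n L : Int) + (pvNB n ([] : List (List String)) : Nat) := by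
      intro n; right; rw [pv_ao_getD, pvNB_nil]; simp
    have h := pv_foldA L [] (array_occurrences L) [] hpre hc
    simpa using h
  have hB : check_empty_arrays_alt L = pvSpec L L [] := by
    rw [show check_empty_arrays_alt L = ((L.reverse.foldl (bStep (L.foldl (fun s entry => if pvTailJoin entry != "" then PySem.Set.add s (pvName entry) else s) PySem.Set.empty)) (([] : List (List String)), PySem.Set.empty)).1).reverse from rfl]
    have hne : ∀ x, x ∈ (L.foldl (fun s entry => if pvTailJoin entry != "" then PySem.Set.add s (pvName entry) else s) PySem.Set.empty) ↔ pvNB x L ≠ 0 := by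
      intro x; rw [pv_ne_mem]; simp [PySem.Set.empty]
    have h := pv_foldB _ L hne L [] [] PySem.Set.empty
      (by intro x; simp [PySem.Set.empty, pvOcc])
    rw [h.1]
    simp
  rw [hA, hB]
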